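-- pv_equiv track=rewrite | github.com/Anvar000/Epam_2021 | homework1/task02.py | check_fibonacci
-- ===== SOURCE A (Python) =====
-- from typing import Sequence
--
-- def check_fibonacci(data: Sequence[int]) -> bool:
--     """This function check is the given data the sequence of the Fibonacci or not
--
--     Args:
--         data (Sequence[int]): given data as the list of integer numbers
--
--     Returns:
--         bool: True - if the given data is the sequence of the Fibonacci
--               False - on the other cases
--     """
--
--     if not data:
--         return False
--     if len(data) > 2 and data[0] == 0 and data[1] == 1:
--         first = data[0]
--         second = data[1]
--         for element in data[2:]:
--             if first + second != element:
--                 return False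
--             first, second = second, element
--         return True
--     return False
-- ===== SOURCE B (Python) =====
-- def check_fibonacci(data):
--     """Build the canonical Fibonacci table of the same length, then compare."""
--     if len(data) <= 2 or list(data[:2]) != [0, 1]:
--         return False
--     fibs = [0, 1]
--     while len(fibs) < len(data):
--         fibs.append(fibs[-1] + fibs[-2])
--     return list(data) == fibs
-- ===== Notes on version B (the rewrite author's own statement) =====
-- stated objective: alternative
-- what changed: B precomputes the canonical Fibonacci reference table of the input's length (a table-building pass keyed only by length and the 0,1 prefix) and then decides by a single whole-list equality comparison, instead of A's inline verification that carries first/second through the data with an early return.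
import Mathlib
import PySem

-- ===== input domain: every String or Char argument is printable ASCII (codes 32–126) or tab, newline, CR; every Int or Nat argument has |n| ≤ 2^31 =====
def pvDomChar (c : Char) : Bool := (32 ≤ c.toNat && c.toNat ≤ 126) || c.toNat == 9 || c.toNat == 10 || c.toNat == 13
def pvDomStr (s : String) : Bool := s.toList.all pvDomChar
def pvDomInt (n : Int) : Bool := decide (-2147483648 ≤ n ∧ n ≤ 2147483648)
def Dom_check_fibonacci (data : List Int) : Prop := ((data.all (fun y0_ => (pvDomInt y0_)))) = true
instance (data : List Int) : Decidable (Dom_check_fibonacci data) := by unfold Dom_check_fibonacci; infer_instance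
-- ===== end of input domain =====

-- B builds the canonical Fibonacci reference table of the input's length and compares the
-- whole list against it, instead of A's inline rolling-state verification (alternative).

-- ===== PORT A =====
-- the for-loop over data[2:] with early 'return False', carrying first/second
def checkLoop (first second : Int) : List Int → Bool
  | [] => true
  | element :: rest =>
    if first + second ≠ element then false else checkLoop second element rest

def check_fibonacci (data : List Int) : Bool :=
  if data = [] then false
  else if 2 < data.length && (PySem.List.pyGet? data 0 == some 0)
          && (PySem.List.pyGet? data 1 == some 1) then
    -- the guard guarantees len(data) > 2, so data[0]/data[1] exist; .getD 0 never uses its default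
    checkLoop ((PySem.List.pyGet? data 0).getD 0) ((PySem.List.pyGet? data 1).getD 0)
      (PySem.List.slice data (some 2) none)
  else false

-- ===== PORT B =====
-- while len(fibs) < n: fibs.append(fibs[-1] + fibs[-2])
-- fibs starts as [0,1], so fibs[-1]/fibs[-2] always exist; .getD 0 never uses its default
def buildFibs (n : Nat) (fibs : List Int) : List Int :=
  if fibs.length < n then
    buildFibs n (fibs ++ [((PySem.List.pyGet? fibs (-1)).getD 0) + ((PySem.List.pyGet? fibs (-2)).getD 0)])
  else fibs
termination_by n - fibs.length
decreasing_by simp; omega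

def check_fibonacci_alt (data : List Int) : Bool :=
  if data.length ≤ 2 || !(PySem.List.slice data none (some 2) == [0, 1]) then false
  else data == buildFibs data.length [0, 1]

-- ===== PRECONDITION & SPEC =====
def Spec_check_fibonacci (data : List Int) (out : Bool) : Prop := out = check_fibonacci_alt data
instance (data : List Int) (out : Bool) : Decidable (Spec_check_fibonacci data out) := by unfold Spec_check_fibonacci; infer_instance

-- ===== CLAIM (what is proved, stated in full; the proofs are below) =====
def Claim_equal_check_fibonacci : Prop := ∀ (data : List Int), Dom_check_fibonacci data → Spec_check_fibonacci data (check_fibonacci data)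

-- ===== LEMMAS AND PROOFS =====

-- buildFibs only appends, so its argument is a prefix of its result
theorem buildFibs_prefix (n : Nat) (q : List Int) : q <+: buildFibs n q := by
  rw [buildFibs]
  split
  · exact List.IsPrefix.trans (List.prefix_append _ _) (buildFibs_prefix n _)
  · exact List.prefix_rfl
termination_by n - q.length
decreasing_by simp; omega

-- fibs[-1] and fibs[-2] of a list ending in [a, b]
theorem pyGet_neg1 (p : List Int) (a b : Int) :
    (PySem.List.pyGet? (p ++ [a, b]) (-1)).getD 0 = b := by
  simp [PySem.List.pyGet?, PySem.List.pyIdx?]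

theorem pyGet_neg2 (p : List Int) (a b : Int) :
    (PySem.List.pyGet? (p ++ [a, b]) (-2)).getD 0 = a := by
  have : p ++ [a, b] = (p ++ [a]) ++ [b] := by simp
  rw [this]
  simp [PySem.List.pyGet?, PySem.List.pyIdx?]

-- A's rolling-state loop agrees with "the whole list equals the reference table"
theorem loop_eq_table (l : List Int) : ∀ (p : List Int) (a b : Int),
    checkLoop a b l = decide (p ++ a :: b :: l = buildFibs (p.length + 2 + l.length) (p ++ [a, b])) := by
  induction l with
  | nil =>
    intro p a b
    rw [buildFibs]
    simp [checkLoop]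
  | cons x l ih =>
    intro p a b
    rw [buildFibs]
    have hlen : (p ++ [a, b]).length < p.length + 2 + (x :: l).length := by simp
    rw [if_pos hlen, pyGet_neg1, pyGet_neg2]
    by_cases hx : x = a + b
    · subst hx
      have h1 : (p ++ [a, b]) ++ [b + a] = (p ++ [a]) ++ [b, b + a] := by simp
      have h2 : p ++ a :: b :: (a + b) :: l = (p ++ [a]) ++ b :: (a + b) :: l := by simp
      have h3 : p.length + 2 + (((a+b) :: l).length) = (p ++ [a]).length + 2 + l.length := by
        simp; omega
      rw [h1, h2, h3, Int.add_comm b a, ← ih (p ++ [a]) b (a + b)]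
      simp [checkLoop]
    · have hloop : checkLoop a b (x :: l) = false := by
        simp [checkLoop]
        exact fun h => absurd (Eq.symm h) hx
      rw [hloop, eq_comm, decide_eq_false_iff_not]
      intro heq
      -- the table has a+b at index p.length+2, the data has x there
      have hpre : ((p ++ [a, b]) ++ [b + a]) <+:
          buildFibs (p.length + 2 + (x :: l).length) ((p ++ [a, b]) ++ [b + a]) :=
        buildFibs_prefix _ _
      obtain ⟨t, ht⟩ := hpre
      have := congrArg (fun (ys : List Int) => ys[p.length + 2]?) (heq.trans ht.symm)
      simp at this
      omega

-- ===== VERDICT (by name: the statement is the Claim_ definition above) =====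
theorem check_fibonacci_spec : Claim_equal_check_fibonacci := by
  unfold Claim_equal_check_fibonacci Spec_check_fibonacci
  intro data _
  match data with
  | [] => rfl
  | [d0] => rfl
  | [d0, d1] => rfl
  | d0 :: d1 :: x :: rest =>
    simp only [check_fibonacci, check_fibonacci_alt, PySem.List.pyGet?, PySem.List.pyIdx?,
      PySem.List.slice, List.length_cons]
    have hA : (0:Int) ≤ (rest.length:Int) + 1 + 1 := by positivity
    have hB : (0:Int) ≤ (rest.length:Int) + 1 := by positivity
    have hn : 2 + (rest.length + 1) = rest.length + 1 + 1 + 1 := by omega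
    by_cases h0 : d0 = 0 <;> by_cases h1 : d1 = 1 <;>
      simp [h0, h1, hA, hB, loop_eq_table (x :: rest) [] 0 1, hn]
    rw [Bool.eq_iff_iff]
    simp
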